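-- pv_equiv track=rewrite | github.com/Undefined01/fourteen_minesweeper_variants_solver | fourteen_minesweeper_variant_solver/rule/util.py | get_diagonal_neighbors_of_cells
-- ===== SOURCE A (Python) =====
-- def get_diagonal_neighbors_of_cells(height: int, width: int) -> dict[tuple[int, int], list[tuple[int, int]]]:
--     neighbors: dict[tuple[int, int], list[tuple[int, int]]] = {}
--     for r in range(height):
--         for c in range(width):
--             neighbors[(r, c)] = [
--                 (i, j)
--                 for i in range(max(0, r - 1), min(height, r + 2))
--                 for j in range(max(0, c - 1), min(width, c + 2))
--                 if (i, j) != (r, c) and abs(i - r) == abs(j - c)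
--             ]
--     return neighbors
-- ===== SOURCE B (Python) =====
-- def get_diagonal_neighbors_of_cells(height: int, width: int) -> dict[tuple[int, int], list[tuple[int, int]]]:
--     neighbors: dict[tuple[int, int], list[tuple[int, int]]] = {}
--     for r in range(height):
--         for c in range(width):
--             cell = []
--             for di, dj in ((-1, -1), (-1, 1), (1, -1), (1, 1)):
--                 i, j = r + di, c + dj
--                 if 0 <= i < height and 0 <= j < width:
--                     cell.append((i, j))
--             neighbors[(r, c)] = cell
--     return neighbors
-- ===== Notes on version B (the rewrite author's own statement) =====
-- stated objective: faster
-- what changed: Replaces the 3x3-window double comprehension with the abs-equality filter by direct enumeration of the four fixed diagonal offsets with a plain bounds check and append.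
import Mathlib
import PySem

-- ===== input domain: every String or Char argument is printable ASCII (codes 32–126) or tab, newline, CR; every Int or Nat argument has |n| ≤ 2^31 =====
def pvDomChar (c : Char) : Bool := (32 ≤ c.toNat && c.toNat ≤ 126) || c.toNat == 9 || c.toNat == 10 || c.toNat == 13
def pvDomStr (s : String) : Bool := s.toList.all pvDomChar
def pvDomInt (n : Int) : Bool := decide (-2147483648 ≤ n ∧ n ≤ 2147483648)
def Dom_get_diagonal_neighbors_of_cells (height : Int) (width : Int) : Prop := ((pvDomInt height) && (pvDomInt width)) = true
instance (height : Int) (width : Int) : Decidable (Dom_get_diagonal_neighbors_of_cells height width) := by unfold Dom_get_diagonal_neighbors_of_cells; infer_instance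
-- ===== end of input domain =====

-- B replaces A's 3×3-window comprehension with abs-filter by direct enumeration of the
-- four diagonal offsets with a bounds check (objective: simpler).

-- ===== PORT A =====
-- the inner list comprehension of A: nested generators with the filter clause
def pvCellA (height : Int) (width : Int) (r : Int) (c : Int) : List (Int × Int) :=
  (PySem.List.pyRange (max 0 (r - 1)) (min height (r + 2)) 1).flatMap (fun i =>
    ((PySem.List.pyRange (max 0 (c - 1)) (min width (c + 2)) 1).filter (fun j =>
      decide ((i, j) ≠ (r, c) ∧ (i - r).natAbs = (j - c).natAbs))).map (fun j => (i, j)))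

def get_diagonal_neighbors_of_cells (height : Int) (width : Int) : List (Int × Int × List (Int × Int)) :=
  (PySem.List.pyRange 0 height 1).foldl (fun neighbors r =>
    (PySem.List.pyRange 0 width 1).foldl (fun neighbors c =>
      neighbors ++ [(r, c, pvCellA height width r c)]) neighbors) []

-- ===== PORT B =====
-- the inner loop of B: the four diagonal offsets, appended when in bounds
def pvCellB (height : Int) (width : Int) (r : Int) (c : Int) : List (Int × Int) :=
  ([(-1, -1), (-1, 1), (1, -1), (1, 1)] : List (Int × Int)).foldl (fun cell d =>
    let i := r + d.1
    let j := c + d.2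
    if 0 ≤ i ∧ i < height ∧ 0 ≤ j ∧ j < width then cell ++ [(i, j)] else cell) []

def get_diagonal_neighbors_of_cells_alt (height : Int) (width : Int) : List (Int × Int × List (Int × Int)) :=
  (PySem.List.pyRange 0 height 1).foldl (fun neighbors r =>
    (PySem.List.pyRange 0 width 1).foldl (fun neighbors c =>
      neighbors ++ [(r, c, pvCellB height width r c)]) neighbors) []

-- ===== PRECONDITION & SPEC =====
def Spec_get_diagonal_neighbors_of_cells (height : Int) (width : Int) (out : List (Int × Int × List (Int × Int))) : Prop := out = get_diagonal_neighbors_of_cells_alt height width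
instance (height : Int) (width : Int) (out : List (Int × Int × List (Int × Int))) : Decidable (Spec_get_diagonal_neighbors_of_cells height width out) := by unfold Spec_get_diagonal_neighbors_of_cells; infer_instance

-- ===== CLAIM (what is proved, stated in full; the proofs are below) =====
def Claim_equal_get_diagonal_neighbors_of_cells : Prop := ∀ (height : Int) (width : Int), Dom_get_diagonal_neighbors_of_cells height width → Spec_get_diagonal_neighbors_of_cells height width (get_diagonal_neighbors_of_cells height width)

-- ===== LEMMAS AND PROOFS =====

theorem pyRange_len1 (a : Int) : PySem.List.pyRange a (a + 1) 1 = [a] := by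
  rw [PySem.List.pyRange_one]; norm_num

theorem pyRange_len2 (a : Int) : PySem.List.pyRange a (a + 2) 1 = [a, a + 1] := by
  rw [PySem.List.pyRange_one]; norm_num [show Int.toNat 2 = 2 from rfl, show Int.toNat 3 = 3 from rfl, List.range_succ]

theorem pyRange_len3 (a : Int) : PySem.List.pyRange a (a + 3) 1 = [a, a + 1, a + 2] := by
  rw [PySem.List.pyRange_one]; norm_num [show Int.toNat 2 = 2 from rfl, show Int.toNat 3 = 3 from rfl, List.range_succ]

theorem rowRange (a b : Int) (h0 : 0 ≤ a) (hab : a < b) :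
    PySem.List.pyRange (max 0 (a - 1)) (min b (a + 2)) 1 =
      (if 1 ≤ a then [a - 1] else []) ++ [a] ++ (if a + 1 < b then [a + 1] else []) := by
  by_cases h1 : 1 ≤ a <;> by_cases h2 : a + 1 < b
  · rw [show max 0 (a-1) = a-1 from by omega, show min b (a+2) = (a-1)+3 from by omega,
      pyRange_len3]
    simp [h1, h2] <;> omega
  · rw [show max 0 (a-1) = a-1 from by omega, show min b (a+2) = (a-1)+2 from by omega,
      pyRange_len2]
    simp [h1, h2] <;> omega
  · rw [show max 0 (a-1) = a from by omega, show min b (a+2) = a+2 from by omega,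
      pyRange_len2]
    simp [h1, h2]
  · rw [show max 0 (a-1) = a from by omega, show min b (a+2) = a+1 from by omega,
      pyRange_len1]
    simp [h1, h2]

set_option maxHeartbeats 1000000 in
theorem cell_eq (height width r c : Int) (hr0 : 0 ≤ r) (hrh : r < height)
    (hc0 : 0 ≤ c) (hcw : c < width) :
    pvCellA height width r c = pvCellB height width r c := by
  unfold pvCellA pvCellB
  rw [rowRange r height hr0 hrh, rowRange c width hc0 hcw]
  have n1 : ((r : Int) - 1 - r).natAbs = 1 := by omega
  have n2 : ((r : Int) + 1 - r).natAbs = 1 := by omega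
  have n3 : ((c : Int) - 1 - c).natAbs = 1 := by omega
  have n4 : ((c : Int) + 1 - c).natAbs = 1 := by omega
  have n0 : ((r : Int) - r).natAbs = 0 := by omega
  have e1 : (r : Int) - 1 ≠ r := by omega
  have e2 : (r : Int) + 1 ≠ r := by omega
  have e3 : (c : Int) - 1 ≠ c := by omega
  have e4 : (c : Int) + 1 ≠ c := by omega
  by_cases h1 : 1 ≤ r <;> by_cases h2 : r + 1 < height <;>
    by_cases h3 : 1 ≤ c <;> by_cases h4 : c + 1 < width <;>
  · simp only [h1, h2, h3, h4, if_true, if_false, List.foldl, List.flatMap, List.filter,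
      List.map, List.append_nil, List.nil_append, List.cons_append,
      decide_eq_true_eq, ne_eq, Prod.mk.injEq, n0, n1, n2, n3, n4, e1, e2, e3, e4]
    norm_num
    first | rfl | omega | (split_ifs <;> first | rfl | omega | simp_all)

theorem get_diagonal_neighbors_of_cells_spec : Claim_equal_get_diagonal_neighbors_of_cells := by
  intro height width _
  unfold Spec_get_diagonal_neighbors_of_cells
  unfold get_diagonal_neighbors_of_cells get_diagonal_neighbors_of_cells_alt
  apply PySem.List.foldl_congr_mem
  intro acc r hrmem
  rw [PySem.List.mem_pyRange_one] at hrmem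
  apply PySem.List.foldl_congr_mem
  intro acc' c hcmem
  rw [PySem.List.mem_pyRange_one] at hcmem
  rw [cell_eq height width r c hrmem.1 hrmem.2 hcmem.1 hcmem.2]
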